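-- pv_equiv track=rewrite | github.com/dshorter/predictor_ingest | scripts/run_pipeline.py | parse_docpack_output
-- ===== SOURCE A (Python) =====
-- def parse_docpack_output(stdout: str) -> dict:
--     """Parse docpack stage stdout for stats."""
--     stats = {"docsBundled": 0, "qualifiedTotal": 0, "qualifiedExcluded": 0}
--     for line in stdout.splitlines():
--         if "bundled" in line.lower():
--             for word in line.split():
--                 if word.isdigit():
--                     stats["docsBundled"] = int(word)
--                     break
--         # "Qualified: 42 total, 17 excluded by budget"
--         if line.startswith("Qualified:"):
--             parts = line.split(",")
--             for part in parts:
--                 part = part.strip()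
--                 for word in part.split():
--                     if word.isdigit():
--                         if "total" in part:
--                             stats["qualifiedTotal"] = int(word)
--                         elif "excluded" in part:
--                             stats["qualifiedExcluded"] = int(word)
--                         break
--     return stats
-- ===== SOURCE B (Python) =====
-- def _first_token_int(s):
--     """First whitespace-delimited maximal digit run in s, as int; None if absent.
--     Char-level scan: no tokenization of the whole string."""
--     i, n = 0, len(s)
--     while i < n:
--         c = s[i]
--         if c.isspace():
--             i += 1
--         elif c.isdigit():
--             j = i
--             while j < n and s[j].isdigit():
--                 j += 1
--             if j == n or s[j].isspace():
--                 return int(s[i:j])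
--             while j < n and not s[j].isspace():
--                 j += 1
--             i = j
--         else:
--             while i < n and not s[i].isspace():
--                 i += 1
--     return None
--
--
-- def parse_docpack_output(stdout: str) -> dict:
--     """Parse docpack stage stdout for stats."""
--     docs = total = excluded = 0
--     for line in stdout.splitlines():
--         if "bundled" in line.lower():
--             v = _first_token_int(line)
--             if v is not None:
--                 docs = v
--         if line.startswith("Qualified:"):
--             for part in line.split(","):
--                 part = part.strip()
--                 v = _first_token_int(part)
--                 if v is not None:
--                     if "total" in part:
--                         total = v
--                     elif "excluded" in part:
--                         excluded = v
--     return {"docsBundled": docs, "qualifiedTotal": total, "qualifiedExcluded": excluded}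
-- ===== Notes on version B (the rewrite author's own statement) =====
-- stated objective: alternative
-- what changed: Replaces A's per-line tokenization (split() plus a whole-word isdigit scan with break) and in-place dict mutation by a character-level scanner that finds the first whitespace-delimited maximal digit run directly, and by three plain counters assembled into the dict once at the end.
import Mathlib
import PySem

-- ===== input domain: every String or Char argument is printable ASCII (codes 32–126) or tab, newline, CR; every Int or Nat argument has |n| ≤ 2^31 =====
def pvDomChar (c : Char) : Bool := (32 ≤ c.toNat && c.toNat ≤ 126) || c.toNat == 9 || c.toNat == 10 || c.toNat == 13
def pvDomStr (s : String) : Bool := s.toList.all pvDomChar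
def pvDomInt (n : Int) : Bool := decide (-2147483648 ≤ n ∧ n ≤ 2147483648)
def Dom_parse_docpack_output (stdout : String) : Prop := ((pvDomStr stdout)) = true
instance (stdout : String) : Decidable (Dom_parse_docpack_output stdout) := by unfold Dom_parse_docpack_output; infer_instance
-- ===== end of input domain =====

-- B replaces A's per-line tokenization (split() + whole-word isdigit scan) and in-place dict
-- mutation by a char-level scanner for the first whitespace-delimited digit run and a plain
-- triple of counters assembled into the dict once at the end (objective: alternative).

-- ===== PORT A =====
-- A's inner 'for word in …: if word.isdigit(): … ; break' loop: the word it stops at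
def pvA_firstDigitWord : List (List Char) → Option (List Char)
  | [] => none
  | w :: rest => if PySem.Chars.strIsdigit w then some w else pvA_firstDigitWord rest

-- int(word) for a word A has checked with isdigit: PySem.Int.ofChars? is `some` there, so getD 0 is exact
def pvA_int (w : List Char) : Int := (PySem.Int.ofChars? w).getD 0

-- body of A's 'for part in parts' loop
def pvA_partStep (stats : PySem.Dict String Int) (part0 : List Char) : PySem.Dict String Int :=
  let part := PySem.Chars.strip part0
  match pvA_firstDigitWord (PySem.Chars.split₀ part) with
  | some w =>
    if PySem.Chars.isIn "total".toList part then stats.insert "qualifiedTotal" (pvA_int w)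
    else if PySem.Chars.isIn "excluded".toList part then stats.insert "qualifiedExcluded" (pvA_int w)
    else stats
  | none => stats

-- body of A's 'for line in stdout.splitlines()' loop
def pvA_lineStep (stats : PySem.Dict String Int) (line : List Char) : PySem.Dict String Int :=
  let stats :=
    if PySem.Chars.isIn "bundled".toList (PySem.Chars.lower line) then
      match pvA_firstDigitWord (PySem.Chars.split₀ line) with
      | some w => stats.insert "docsBundled" (pvA_int w)
      | none => stats
    else stats
  if PySem.Chars.startswith line "Qualified:".toList then
    (PySem.Chars.splitOn line [',']).foldl pvA_partStep stats
  else stats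

def parse_docpack_output (stdout : String) : List (String × Int) :=
  let stats0 : PySem.Dict String Int :=
    ((PySem.Dict.empty.insert "docsBundled" 0).insert "qualifiedTotal" 0).insert "qualifiedExcluded" 0
  ((PySem.Chars.splitlines stdout.toList).foldl pvA_lineStep stats0).items

-- ===== PORT B =====
-- B's char-level scan (Source B's _first_token_int); the while loops are takeWhile/dropWhile
def pvB_scan : List Char → Option Int
  | [] => none
  | c :: rest =>
    if PySem.Chars.isspace c then pvB_scan rest
    else if PySem.Chars.isdigit c then
      let digs := (c :: rest).takeWhile PySem.Chars.isdigit
      let rest' := rest.dropWhile PySem.Chars.isdigit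
      if rest'.isEmpty || PySem.Chars.isspace (rest'.headD ' ') then
        some ((PySem.Int.ofChars? digs).getD 0)
      else pvB_scan (rest'.dropWhile (fun x => !PySem.Chars.isspace x))
    else pvB_scan (rest.dropWhile (fun x => !PySem.Chars.isspace x))
  termination_by s => s.length
  decreasing_by
  · simp
  · have := List.length_dropWhile_le (fun x => !PySem.Chars.isspace x) (rest.dropWhile PySem.Chars.isdigit)
    have := List.length_dropWhile_le PySem.Chars.isdigit rest
    simp at *; omega
  · have := List.length_dropWhile_le (fun x => !PySem.Chars.isspace x) rest
    simp at *; omega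

-- body of B's 'for part in …' loop over the state (docs, total, excluded)
def pvB_partStep (st : Int × Int × Int) (part0 : List Char) : Int × Int × Int :=
  let part := PySem.Chars.strip part0
  match pvB_scan part with
  | some v =>
    if PySem.Chars.isIn "total".toList part then (st.1, v, st.2.2)
    else if PySem.Chars.isIn "excluded".toList part then (st.1, st.2.1, v)
    else st
  | none => st

-- body of B's 'for line in …' loop
def pvB_lineStep (st : Int × Int × Int) (line : List Char) : Int × Int × Int :=
  let st :=
    if PySem.Chars.isIn "bundled".toList (PySem.Chars.lower line) then
      match pvB_scan line with
      | some v => (v, st.2.1, st.2.2)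
      | none => st
    else st
  if PySem.Chars.startswith line "Qualified:".toList then
    (PySem.Chars.splitOn line [',']).foldl pvB_partStep st
  else st

def parse_docpack_output_alt (stdout : String) : List (String × Int) :=
  let st := (PySem.Chars.splitlines stdout.toList).foldl pvB_lineStep ((0 : Int), (0 : Int), (0 : Int))
  [("docsBundled", st.1), ("qualifiedTotal", st.2.1), ("qualifiedExcluded", st.2.2)]

-- ===== PRECONDITION & SPEC =====
def Spec_parse_docpack_output (stdout : String) (out : List (String × Int)) : Prop := out = parse_docpack_output_alt stdout
instance (stdout : String) (out : List (String × Int)) : Decidable (Spec_parse_docpack_output stdout out) := by unfold Spec_parse_docpack_output; infer_instance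

-- ===== CLAIM (what is proved, stated in full; the proofs are below) =====
def Claim_equal_parse_docpack_output : Prop := ∀ (stdout : String), Dom_parse_docpack_output stdout → Spec_parse_docpack_output stdout (parse_docpack_output stdout)

-- ===== LEMMAS AND PROOFS =====

-- characterization of PySem.Chars.split₀ (A's line.split()) as takeWhile/dropWhile steps
theorem split0_go_append (s : List Char) : ∀ (cur : List Char) (acc : List (List Char)),
    PySem.Chars.split₀.go s cur acc = acc.reverse ++ PySem.Chars.split₀.go s cur [] := by
  induction s with
  | nil =>
    intro cur acc
    simp only [PySem.Chars.split₀.go]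
    by_cases h : cur.isEmpty <;> simp [h]
  | cons c rest ih =>
    intro cur acc
    simp only [PySem.Chars.split₀.go]
    by_cases hs : PySem.Chars.isspace c
    · by_cases hc : cur.isEmpty <;> simp only [hs, hc, if_true]
      · rw [ih]
      · rw [ih [] (cur.reverse :: acc), ih [] [cur.reverse]]
        simp
    · simp only [hs, Bool.false_eq_true, if_false]
      rw [ih]

theorem split0_nil : PySem.Chars.split₀ [] = [] := rfl

theorem split0_cons_space {c : Char} (s : List Char) (h : PySem.Chars.isspace c = true) :
    PySem.Chars.split₀ (c :: s) = PySem.Chars.split₀ s := by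
  simp [PySem.Chars.split₀, PySem.Chars.split₀.go, h]

theorem split0_go_word (s : List Char) : ∀ (cur : List Char), cur ≠ [] →
    PySem.Chars.split₀.go s cur [] =
      (cur.reverse ++ s.takeWhile (fun x => !PySem.Chars.isspace x)) ::
        PySem.Chars.split₀ (s.dropWhile (fun x => !PySem.Chars.isspace x)) := by
  induction s with
  | nil =>
    intro cur hcur
    simp [PySem.Chars.split₀.go, List.isEmpty_iff, hcur, split0_nil]
  | cons c rest ih =>
    intro cur hcur
    simp only [PySem.Chars.split₀.go]
    by_cases hs : PySem.Chars.isspace c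
    · simp only [hs, List.isEmpty_iff, hcur, if_true, if_false]
      rw [split0_go_append, List.takeWhile_cons, List.dropWhile_cons]
      simp only [hs, Bool.not_true, Bool.false_eq_true, if_false]
      rw [split0_cons_space rest hs]
      simp [PySem.Chars.split₀]
    · simp only [hs, Bool.false_eq_true, if_false]
      rw [ih (c :: cur) (by simp), List.takeWhile_cons, List.dropWhile_cons]
      simp [hs]

theorem split0_cons_word {c : Char} (s : List Char) (h : PySem.Chars.isspace c = false) :
    PySem.Chars.split₀ (c :: s) =
      (c :: s.takeWhile (fun x => !PySem.Chars.isspace x)) ::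
        PySem.Chars.split₀ (s.dropWhile (fun x => !PySem.Chars.isspace x)) := by
  simp only [PySem.Chars.split₀, PySem.Chars.split₀.go, h, Bool.false_eq_true, if_false]
  rw [split0_go_word s [c] (by simp)]
  simp
  rfl

theorem isspace_of_isdigit {c : Char} (h : PySem.Chars.isdigit c = true) : PySem.Chars.isspace c = false := by
  simp only [PySem.Chars.isdigit, Bool.and_eq_true, decide_eq_true_eq, Char.le_def, UInt32.le_iff_toNat_le] at h
  simp only [PySem.Chars.isspace]
  obtain ⟨h1, h2⟩ := h
  simp only [Char.toNat] at *
  simp only [show ('0':Char).val.toNat = 48 from rfl, show ('9':Char).val.toNat = 57 from rfl] at h1 h2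
  simp only [Bool.or_eq_false_iff, Bool.and_eq_false_iff, decide_eq_false_iff_not]
  omega

theorem takeWhile_notspace_digits (rest : List Char) :
    rest.takeWhile (fun x => !PySem.Chars.isspace x) =
      rest.takeWhile PySem.Chars.isdigit ++
        (rest.dropWhile PySem.Chars.isdigit).takeWhile (fun x => !PySem.Chars.isspace x) := by
  conv_lhs => rw [← List.takeWhile_append_dropWhile (p := PySem.Chars.isdigit) (l := rest)]
  rw [List.takeWhile_append, if_pos]
  rw [List.takeWhile_eq_self_iff.mpr]
  intro x hx
  simp [isspace_of_isdigit (List.mem_takeWhile_imp hx)]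

theorem dropWhile_notspace_digits (rest : List Char) :
    rest.dropWhile (fun x => !PySem.Chars.isspace x) =
      (rest.dropWhile PySem.Chars.isdigit).dropWhile (fun x => !PySem.Chars.isspace x) := by
  conv_lhs => rw [← List.takeWhile_append_dropWhile (p := PySem.Chars.isdigit) (l := rest)]
  rw [List.dropWhile_append]
  rw [if_pos]
  simp only [List.isEmpty_iff]
  rw [List.dropWhile_eq_nil_iff]
  intro x hx
  simp [isspace_of_isdigit (List.mem_takeWhile_imp hx)]

-- the crux: B's char scan computes exactly int() of the first all-digit word of A's split()
theorem pvB_scan_eq_A (s : List Char) :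
    pvB_scan s = Option.map pvA_int (pvA_firstDigitWord (PySem.Chars.split₀ s)) := by
  induction s using pvB_scan.induct with
  | case1 => simp [pvB_scan, split0_nil, pvA_firstDigitWord]
  | case2 c rest hs ih =>
    rw [pvB_scan, split0_cons_space rest hs]
    simp only [hs, if_true, ih]
  | case3 c rest hs hd rpr hstop =>
    have hr : rpr = List.dropWhile PySem.Chars.isdigit rest := rfl
    rw [hr] at hstop
    have hs' : PySem.Chars.isspace c = false := by simpa using hs
    rw [pvB_scan]
    simp only [hs', Bool.false_eq_true, if_false, hd, if_true, if_pos hstop]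
    rw [split0_cons_word rest hs']
    have hsplit : rest.takeWhile (fun x => !PySem.Chars.isspace x) = rest.takeWhile PySem.Chars.isdigit := by
      rw [takeWhile_notspace_digits]
      rcases hne : rest.dropWhile PySem.Chars.isdigit with _ | ⟨d, tl⟩
      · simp
      · rw [hne] at hstop
        simp only [List.isEmpty_cons, List.headD_cons, Bool.false_or] at hstop
        simp [List.takeWhile_cons, hstop]
    have hall : PySem.Chars.strIsdigit (c :: rest.takeWhile PySem.Chars.isdigit) = true := by
      simp only [PySem.Chars.strIsdigit, List.isEmpty_cons, Bool.not_false, Bool.true_and, List.all_cons, hd, List.all_eq_true]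
      exact fun x hx => List.mem_takeWhile_imp hx
    rw [hsplit]
    simp [pvA_firstDigitWord, hall, pvA_int, List.takeWhile_cons, hd]
  | case4 c rest hs hd rpr hstop ih =>
    have hr : rpr = List.dropWhile PySem.Chars.isdigit rest := rfl
    rw [hr] at hstop ih
    have hs' : PySem.Chars.isspace c = false := by simpa using hs
    rw [Bool.not_eq_true] at hstop
    rcases hrest' : rest.dropWhile PySem.Chars.isdigit with _ | ⟨d, tl⟩
    · rw [hrest'] at hstop; simp at hstop
    rw [hrest'] at hstop ih
    simp only [List.isEmpty_cons, List.headD_cons, Bool.false_or] at hstop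
    have hdsp : PySem.Chars.isspace d = false := hstop
    have hddig : PySem.Chars.isdigit d = false := by
      have hne2 : rest.dropWhile PySem.Chars.isdigit ≠ [] := by rw [hrest']; simp
      have := List.head_dropWhile_not PySem.Chars.isdigit hne2
      rw [← Bool.not_eq_true]
      simpa [hrest'] using this
    rw [pvB_scan]
    simp only [hs', Bool.false_eq_true, if_false, hd, if_true]
    rw [if_neg (by rw [hrest']; simp [hdsp])]
    rw [split0_cons_word rest hs']
    have hw : PySem.Chars.strIsdigit (c :: rest.takeWhile (fun x => !PySem.Chars.isspace x)) = false := by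
      simp only [PySem.Chars.strIsdigit, List.isEmpty_cons, Bool.not_false, Bool.true_and, Bool.and_eq_false_iff, List.all_eq_false]
      refine ⟨d, ?_, by simp [hddig]⟩
      apply List.mem_cons_of_mem
      rw [takeWhile_notspace_digits, hrest', List.takeWhile_cons]
      simp [hdsp]
    simp only [pvA_firstDigitWord, hw, Bool.false_eq_true, if_false]
    conv_rhs => rw [dropWhile_notspace_digits, hrest']
    rw [hrest']
    exact ih
  | case5 c rest hs hd ih =>
    have hs' : PySem.Chars.isspace c = false := by simpa using hs
    have hd' : PySem.Chars.isdigit c = false := by simpa using hd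
    rw [pvB_scan]
    simp only [hs', Bool.false_eq_true, if_false, hd', ih]
    rw [split0_cons_word rest hs']
    have hw : PySem.Chars.strIsdigit (c :: rest.takeWhile (fun x => !PySem.Chars.isspace x)) = false := by
      simp [PySem.Chars.strIsdigit, hd']
    simp [pvA_firstDigitWord, hw]

-- A's dict always has exactly the three fixed keys, in order: relate it to B's triple
def pvRepr (st : Int × Int × Int) : PySem.Dict String Int :=
  PySem.Dict.mk [("docsBundled", st.1), ("qualifiedTotal", st.2.1), ("qualifiedExcluded", st.2.2)]

theorem pvRepr_insert_docs (st : Int × Int × Int) (v : Int) :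
    (pvRepr st).insert "docsBundled" v = pvRepr (v, st.2.1, st.2.2) := by
  simp [pvRepr, PySem.Dict.insert, PySem.Dict.contains]

theorem pvRepr_insert_total (st : Int × Int × Int) (v : Int) :
    (pvRepr st).insert "qualifiedTotal" v = pvRepr (st.1, v, st.2.2) := by
  simp [pvRepr, PySem.Dict.insert, PySem.Dict.contains]

theorem pvRepr_insert_excl (st : Int × Int × Int) (v : Int) :
    (pvRepr st).insert "qualifiedExcluded" v = pvRepr (st.1, st.2.1, v) := by
  simp [pvRepr, PySem.Dict.insert, PySem.Dict.contains]

theorem partStep_hom (st : Int × Int × Int) (part0 : List Char) :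
    pvA_partStep (pvRepr st) part0 = pvRepr (pvB_partStep st part0) := by
  unfold pvA_partStep pvB_partStep
  simp only [pvB_scan_eq_A]
  rcases pvA_firstDigitWord (PySem.Chars.split₀ (PySem.Chars.strip part0)) with _ | w
  · simp
  · simp only [Option.map_some]
    split_ifs with h1 h2 <;>
      simp [pvRepr_insert_total, pvRepr_insert_excl]

theorem lineStep_hom (st : Int × Int × Int) (line : List Char) :
    pvA_lineStep (pvRepr st) line = pvRepr (pvB_lineStep st line) := by
  unfold pvA_lineStep pvB_lineStep
  rw [pvB_scan_eq_A]
  have hmid :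
      (if PySem.Chars.isIn "bundled".toList (PySem.Chars.lower line) then
        match Option.map pvA_int (pvA_firstDigitWord (PySem.Chars.split₀ line)) with
        | some v => (v, st.2.1, st.2.2)
        | none => st
      else st) =
      (if PySem.Chars.isIn "bundled".toList (PySem.Chars.lower line) then
        match pvA_firstDigitWord (PySem.Chars.split₀ line) with
        | some w => (pvA_int w, st.2.1, st.2.2)
        | none => st
      else st) := by
    rcases pvA_firstDigitWord (PySem.Chars.split₀ line) with _ | w <;> simp
  rw [hmid]
  set mid := (if PySem.Chars.isIn "bundled".toList (PySem.Chars.lower line) then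
        match pvA_firstDigitWord (PySem.Chars.split₀ line) with
        | some w => (pvA_int w, st.2.1, st.2.2)
        | none => st
      else st) with hmiddef
  have hfst :
      (if PySem.Chars.isIn "bundled".toList (PySem.Chars.lower line) then
        match pvA_firstDigitWord (PySem.Chars.split₀ line) with
        | some w => (pvRepr st).insert "docsBundled" (pvA_int w)
        | none => pvRepr st
      else pvRepr st) = pvRepr mid := by
    rw [hmiddef]
    rcases pvA_firstDigitWord (PySem.Chars.split₀ line) with _ | w <;>
      split_ifs <;> simp [pvRepr_insert_docs]
  rw [hfst]
  split_ifs with hq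
  · exact List.foldl_hom pvRepr partStep_hom
  · rfl

-- ===== VERDICT (by name: the statement is the Claim_ definition above) =====
theorem parse_docpack_output_spec : Claim_equal_parse_docpack_output := by
  intro stdout _
  unfold Spec_parse_docpack_output parse_docpack_output parse_docpack_output_alt
  have h0 : (((PySem.Dict.empty.insert "docsBundled" 0).insert "qualifiedTotal" 0).insert "qualifiedExcluded" 0 : PySem.Dict String Int)
      = pvRepr (0, 0, 0) := by rfl
  have hfold := List.foldl_hom (l := PySem.Chars.splitlines stdout.toList)
    (init := ((0 : Int), (0 : Int), (0 : Int))) pvRepr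
    (g₁ := pvB_lineStep) (g₂ := pvA_lineStep) lineStep_hom
  simp only [h0, hfold]
  rfl
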